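-- pv_equiv track=rewrite | github.com/PedroBadii/pruebaGitHub | Python/funciones/numero_binario.py | es_binario
-- ===== SOURCE A (Python) =====
-- def es_binario(num): #num es una cadena con numeros
--     '''
--     >>> es_binario('101101')
--     True
--     >>> es_binario('1j010')
--     False
--     >>> es_binario('189012')
--     False
--     '''
--     binario = True
--     i = 0
--     while binario and i<len(num):
--         if num[i] != '1' and num[i] != '0':
--             binario = False
--         i += 1
--
--     return binario
-- ===== SOURCE B (Python) =====
-- def es_binario(num):
--     return set(num) <= {'0', '1'}
-- ===== Notes on version B (the rewrite author's own statement) =====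
-- stated objective: idiomatic
-- what changed: Replaces the running-boolean while loop (with early exit) by collecting the distinct characters of num into a set in one full pass and returning a single subset test against the two-element set of binary digit characters.
import Mathlib
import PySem

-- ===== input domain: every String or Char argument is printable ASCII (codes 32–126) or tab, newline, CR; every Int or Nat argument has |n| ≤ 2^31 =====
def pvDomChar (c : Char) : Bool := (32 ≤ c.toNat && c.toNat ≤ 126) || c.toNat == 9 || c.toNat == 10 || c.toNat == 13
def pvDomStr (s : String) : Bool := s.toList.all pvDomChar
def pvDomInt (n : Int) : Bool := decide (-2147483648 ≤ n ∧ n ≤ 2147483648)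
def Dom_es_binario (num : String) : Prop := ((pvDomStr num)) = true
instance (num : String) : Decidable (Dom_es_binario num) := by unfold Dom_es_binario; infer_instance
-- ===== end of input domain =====

-- B replaces A's early-exit running-boolean scan by set(num) <= {'0','1'} (idiomatic).

-- ===== PORT A =====
-- while binario and i < len(num): early exit as soon as binario becomes False
def es_binario_loop : List Char → Bool
  | [] => true
  | c :: rest => if c ≠ '1' ∧ c ≠ '0' then false else es_binario_loop rest

def es_binario (num : String) : Bool := es_binario_loop num.toList

-- ===== PORT B =====
def es_binario_alt (num : String) : Bool :=
  PySem.Set.issubset (PySem.Set.ofList num.toList) (PySem.Set.ofList ['0', '1'])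

-- ===== PRECONDITION & SPEC =====
def Spec_es_binario (num : String) (out : Bool) : Prop := out = es_binario_alt num
instance (num : String) (out : Bool) : Decidable (Spec_es_binario num out) := by unfold Spec_es_binario; infer_instance

-- ===== CLAIM (what is proved, stated in full; the proofs are below) =====
def Claim_equal_es_binario : Prop := ∀ (num : String), Dom_es_binario num → Spec_es_binario num (es_binario num)

-- ===== LEMMAS AND PROOFS =====
theorem es_binario_key (l : List Char) :
    PySem.Set.issubset (PySem.Set.ofList l) (PySem.Set.ofList ['0', '1']) = true ↔
      ∀ x ∈ l, x = '0' ∨ x = '1' := by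
  rw [PySem.Set.issubset_iff]
  constructor
  · intro h x hx
    have := (PySem.Set.mem_ofList _ _).mp (h x ((PySem.Set.mem_ofList _ _).mpr hx))
    simpa using this
  · intro h x hx
    exact (PySem.Set.mem_ofList _ _).mpr (by simpa using h x ((PySem.Set.mem_ofList _ _).mp hx))

theorem es_binario_loop_iff (l : List Char) :
    es_binario_loop l = true ↔ ∀ x ∈ l, x = '0' ∨ x = '1' := by
  induction l with
  | nil => simp [es_binario_loop]
  | cons c rest ih =>
    by_cases hc : c ≠ '1' ∧ c ≠ '0'
    · simp only [es_binario_loop, if_pos hc]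
      constructor
      · intro h; cases h
      · intro h
        rcases h c (by simp) with h0 | h1
        · exact absurd h0 hc.2
        · exact absurd h1 hc.1
    · have hc' : c = '0' ∨ c = '1' := by
        by_cases h1 : c = '1'
        · exact Or.inr h1
        · exact Or.inl (by by_contra h0; exact hc ⟨h1, h0⟩)
      simp only [es_binario_loop, if_neg hc, ih]
      constructor
      · intro h x hx
        rcases List.mem_cons.mp hx with rfl | hx'
        · exact hc'
        · exact h x hx'
      · intro h x hx; exact h x (List.mem_cons_of_mem _ hx)

theorem es_binario_loop_eq (l : List Char) :
    es_binario_loop l = PySem.Set.issubset (PySem.Set.ofList l) (PySem.Set.ofList ['0', '1']) := by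
  have := (es_binario_loop_iff l).trans (es_binario_key l).symm
  exact Bool.eq_iff_iff.mpr (by exact_mod_cast this)

-- ===== VERDICT (by name: the statement is the Claim_ definition above) =====
theorem es_binario_spec : Claim_equal_es_binario := by
  intro num _
  unfold Spec_es_binario es_binario es_binario_alt
  exact es_binario_loop_eq num.toList
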